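-- pv_equiv track=rewrite | github.com/ansonk4/Novel-De-Bruijn-Graph-Assembler-for-Millipede-Genomes | last_year/de_bruijn.py | find_contigs
-- ===== SOURCE A (Python) =====
-- def find_contigs(contigs, reads):
--     final_contigs = {}
--     plot_count = 0
--     read_len = len(reads)
--     # sort the contigs, results will be in order from longest to shortest
--     contigs.sort(key=lambda x: len(x), reverse=True)
--     # Assume the longest contig is a major part in the assembly
--     # map input into the contig
--
--     for contig in contigs:
--         if plot_count == read_len:
--             break
--         final_contigs[contig] = []
--         for read in reads:
--         # index is the starting position of the read's appearance in the contig
--             index = contig.find(read)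
--             if index == -1:
--                 continue
--             else:
--                 final_contigs[contig].append((read, index))
--                 plot_count += 1 # one more read-to-contig mapping is found
--
--     return final_contigs
-- ===== SOURCE B (Python) =====
-- def find_contigs(contigs, reads):
--     # Return-value equivalent to A; does not sort `contigs` in place (A does).
--     ordered = sorted(contigs, key=len, reverse=True)
--     rset = set(reads)
--     lengths = sorted(set(len(r) for r in reads))
--     result = {}
--     count = 0
--     n = len(reads)
--     for contig in ordered:
--         if count == n:
--             break
--         pos = {}
--         for i in range(len(contig) + 1):
--             for L in lengths:
--                 s = contig[i:i + L]
--                 if len(s) == L and s in rset and s not in pos: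
--                     pos[s] = i
--         matches = [(r, pos[r]) for r in reads if r in pos]
--         result[contig] = matches
--         count += len(matches)
--     return result
-- ===== Notes on version B (the rewrite author's own statement) =====
-- stated objective: faster
-- what changed: A calls contig.find(read) for every (contig, read) pair; B sweeps each contig once left-to-right, testing the window slice at each position against a set of reads grouped by the distinct read lengths and recording first occurrences in a dict, then rebuilds each contig's match list in read order.
import Mathlib
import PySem

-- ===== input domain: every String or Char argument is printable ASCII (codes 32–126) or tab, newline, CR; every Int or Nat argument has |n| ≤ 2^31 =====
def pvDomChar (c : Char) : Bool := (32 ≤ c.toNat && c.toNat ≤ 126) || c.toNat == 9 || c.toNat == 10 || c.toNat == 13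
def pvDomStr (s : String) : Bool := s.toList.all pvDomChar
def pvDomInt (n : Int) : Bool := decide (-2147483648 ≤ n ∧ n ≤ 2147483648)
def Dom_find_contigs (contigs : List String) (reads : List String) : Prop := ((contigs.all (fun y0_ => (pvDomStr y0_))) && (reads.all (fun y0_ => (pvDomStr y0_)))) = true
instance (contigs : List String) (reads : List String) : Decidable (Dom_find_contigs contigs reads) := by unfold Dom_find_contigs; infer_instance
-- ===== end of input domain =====

-- B replaces A's per-read `contig.find(read)` scan by a single left-to-right sweep over each
-- contig with a set of reads grouped by distinct lengths (first-occurrence dict), then restores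
-- read order; return-value equivalence only: A sorts `contigs` in place, B does not mutate it.


-- ===== PORT A =====
-- inner loop `for read in reads: index = contig.find(read); …` over the state (final_contigs, plot_count)
def findContigsStepA (c : String) (p : PySem.Dict String (List (String × Int)) × Int) (r : String) :
    PySem.Dict String (List (String × Int)) × Int :=
  let index := PySem.Str.find c r
  if index = -1 then p
  else (PySem.Dict.modify p.1 c [] (fun l => l ++ [(r, index)]), p.2 + 1)

-- outer loop `for contig in contigs: if plot_count == read_len: break; …`
def findContigsGoA (reads : List String) :
    List String → PySem.Dict String (List (String × Int)) → Int →
      PySem.Dict String (List (String × Int))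
  | [], d, _ => d
  | c :: rest, d, plot =>
    if plot = (reads.length : Int) then d
    else
      let st := reads.foldl (findContigsStepA c) (PySem.Dict.insert d c [], plot)
      findContigsGoA reads rest st.1 st.2

def find_contigs (contigs : List String) (reads : List String) :
    List (String × List (String × Int)) :=
  (findContigsGoA reads
    (PySem.List.sorted contigs (fun x => PySem.Str.len x) true) PySem.Dict.empty 0).items

-- ===== PORT B =====
-- inner `for L in lengths: s = contig[i:i+L]; if len(s)==L and s in rset and s not in pos: pos[s]=i`
def findContigsLenStep (rset : PySem.Set String) (c : String) (i : Int)
    (pos : PySem.Dict String Int) (L : Int) : PySem.Dict String Int :=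
  if PySem.Str.len (PySem.Str.slice c (some i) (some (i + L))) == L
      && PySem.Set.contains rset (PySem.Str.slice c (some i) (some (i + L)))
      && !pos.contains (PySem.Str.slice c (some i) (some (i + L)))
  then PySem.Dict.insert pos (PySem.Str.slice c (some i) (some (i + L))) i else pos

def findContigsPosStep (rset : PySem.Set String) (lengths : List Int) (c : String)
    (pos : PySem.Dict String Int) (i : Int) : PySem.Dict String Int :=
  lengths.foldl (findContigsLenStep rset c i) pos

-- `[(r, pos[r]) for r in reads if r in pos]`
def findContigsMatches (reads : List String) (pos : PySem.Dict String Int) :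
    List (String × Int) :=
  reads.foldl (fun acc r =>
    match pos.get? r with
    | some i => acc ++ [(r, i)]
    | none => acc) []

def findContigsGoB (reads : List String) (rset : PySem.Set String) (lengths : List Int) :
    List String → PySem.Dict String (List (String × Int)) → Int →
      PySem.Dict String (List (String × Int))
  | [], d, _ => d
  | c :: rest, d, count =>
    if count = (reads.length : Int) then d
    else
      let pos := (PySem.List.pyRange 0 (PySem.Str.len c + 1) 1).foldl
        (findContigsPosStep rset lengths c) PySem.Dict.empty
      let ms := findContigsMatches reads pos
      findContigsGoB reads rset lengths rest (PySem.Dict.insert d c ms)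
        (count + (ms.length : Int))

def find_contigs_alt (contigs : List String) (reads : List String) :
    List (String × List (String × Int)) :=
  let ordered := PySem.List.sorted contigs (fun x => PySem.Str.len x) true
  let rset := PySem.Set.ofList reads
  let lengths := PySem.List.sorted
    (PySem.Set.ofList (reads.map (fun r => PySem.Str.len r))) (fun x => x) false
  (findContigsGoB reads rset lengths ordered PySem.Dict.empty 0).items

-- ===== PRECONDITION & SPEC =====
def Spec_find_contigs (contigs : List String) (reads : List String) (out : List (String × List (String × Int))) : Prop := out = find_contigs_alt contigs reads
instance (contigs : List String) (reads : List String) (out : List (String × List (String × Int))) : Decidable (Spec_find_contigs contigs reads out) := by unfold Spec_find_contigs; infer_instance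

-- ===== CLAIM (what is proved, stated in full; the proofs are below) =====
def Claim_equal_find_contigs : Prop := ∀ (contigs : List String) (reads : List String), Dom_find_contigs contigs reads → Spec_find_contigs contigs reads (find_contigs contigs reads)

-- ===== LEMMAS AND PROOFS =====

-- the per-contig match list both programs compute, in closed form
def findContigsList (c : String) (rs : List String) : List (String × Int) :=
  rs.filterMap (fun r =>
    if PySem.Str.find c r = -1 then none else some (r, PySem.Str.find c r))

theorem findContigs_set_mem (reads : List String) (s : String) :
    PySem.Set.contains (PySem.Set.ofList reads) s = true ↔ s ∈ reads := by
  simp [pysem]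

-- A's inner fold appends exactly findContigsList and counts its length
theorem findContigs_foldA (c : String) (rs : List String)
    (d : PySem.Dict String (List (String × Int))) (acc : List (String × Int)) (cnt : Int) :
    rs.foldl (findContigsStepA c) (PySem.Dict.insert d c acc, cnt)
      = (PySem.Dict.insert d c (acc ++ findContigsList c rs),
         cnt + ((findContigsList c rs).length : Int)) := by
  induction rs generalizing acc cnt with
  | nil => simp [findContigsList]
  | cons r rs ih =>
    rw [List.foldl_cons]
    rcases eq_or_ne (PySem.Str.find c r) (-1) with h | h
    · have h' : PySem.Chars.find c.toList r.toList = -1 := by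
        rw [← PySem.Str.find_eq]; exact h
      have hstep : findContigsStepA c (PySem.Dict.insert d c acc, cnt) r
          = (PySem.Dict.insert d c acc, cnt) := by
        simp [findContigsStepA, PySem.Str.find_eq, h']
      rw [hstep, ih]
      simp [findContigsList, PySem.Str.find_eq, h']
    · have h' : ¬ PySem.Chars.find c.toList r.toList = -1 := by
        rw [← PySem.Str.find_eq]; exact h
      have hstep : findContigsStepA c (PySem.Dict.insert d c acc, cnt) r
          = (PySem.Dict.insert d c (acc ++ [(r, PySem.Str.find c r)]), cnt + 1) := by
        simp [findContigsStepA, PySem.Str.find_eq, h', PySem.Dict.modify,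
          PySem.Dict.getD_insert_self, PySem.Dict.insert_insert_self]
      rw [hstep, ih]
      simp only [findContigsList, List.filterMap_cons, PySem.Str.find_eq, if_neg h',
        Prod.mk.injEq]
      refine ⟨by rw [List.append_assoc]; rfl, ?_⟩
      simp only [List.length_cons]
      push_cast
      ring

-- effect of one inner (lengths) fold on the entry of a read r
theorem findContigs_innerGet (reads : List String) (ls : List Int) (c r : String) (i : Int)
    (hi : 0 ≤ i) (pos : PySem.Dict String Int) :
    (ls.foldl (findContigsLenStep (PySem.Set.ofList reads) c i) pos).get? r
      = if pos.contains r = false ∧ PySem.Str.len r ∈ ls ∧ r ∈ reads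
            ∧ r.toList <+: c.toList.drop i.toNat
        then some i else pos.get? r := by
  induction ls generalizing pos with
  | nil => simp
  | cons L ls ih =>
    have hslice : ∀ n : Nat, (PySem.Str.slice c (some i) (some (i + (n : Int)))).toList
        = (c.toList.drop i.toNat).take n := by
      intro n
      obtain ⟨k, rfl⟩ : ∃ k : Nat, i = (k : Int) := ⟨i.toNat, (Int.toNat_of_nonneg hi).symm⟩
      rw [PySem.Str.toList_slice, PySem.Chars.slice_eq_listSlice, PySem.List.slice_natCast_add]
      simp
    have hlenr : PySem.Str.len r = ((r.toList.length : Nat) : Int) := rfl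
    rw [List.foldl_cons]
    by_cases hhit : L = PySem.Str.len r ∧ r ∈ reads ∧ r.toList <+: c.toList.drop i.toNat
        ∧ pos.contains r = false
    · obtain ⟨hL, hmem, hpre, hcf⟩ := hhit
      have hsr : PySem.Str.slice c (some i) (some (i + L)) = r := by
        apply String.toList_inj.mp
        rw [hL, hlenr, hslice]
        exact (List.prefix_iff_eq_take.mp hpre).symm
      have hstep : findContigsLenStep (PySem.Set.ofList reads) c i pos L
          = PySem.Dict.insert pos r i := by
        unfold findContigsLenStep
        rw [if_pos]
        · rw [hsr]
        · rw [hsr]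
          simp [hL, hcf, hmem]
      rw [hstep, ih]
      have hct : (PySem.Dict.insert pos r i).contains r = true := by
        rw [PySem.Dict.contains_eq_isSome_get?, PySem.Dict.get?_insert_self]; rfl
      rw [hct, if_neg (by simp), PySem.Dict.get?_insert_self,
        if_pos ⟨hcf, List.mem_cons.mpr (Or.inl hL.symm), hmem, hpre⟩]
    · have hstep : (findContigsLenStep (PySem.Set.ofList reads) c i pos L).get? r = pos.get? r
          ∧ (findContigsLenStep (PySem.Set.ofList reads) c i pos L).contains r
              = pos.contains r := by
        unfold findContigsLenStep
        split_ifs with hcond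
        · have hne : r ≠ PySem.Str.slice c (some i) (some (i + L)) := by
            intro hrs
            simp only [Bool.and_eq_true, beq_iff_eq, Bool.not_eq_true'] at hcond
            apply hhit
            have hlen : PySem.Str.len r = L := by rw [hrs]; exact hcond.1.1
            have hL' : L = ((r.toList.length : Nat) : Int) := by rw [← hlen]; exact hlenr
            refine ⟨hlen.symm, ?_, ?_, ?_⟩
            · rw [← findContigs_set_mem reads r, hrs]; exact hcond.1.2
            · apply List.prefix_iff_eq_take.mpr
              conv_lhs => rw [hrs]
              rw [hL', hslice]
            · rw [hrs]; exact hcond.2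
          refine ⟨PySem.Dict.get?_insert_of_ne pos _ hne, ?_⟩
          rw [PySem.Dict.contains_eq_isSome_get?, PySem.Dict.get?_insert_of_ne pos _ hne,
            ← PySem.Dict.contains_eq_isSome_get?]
        · exact ⟨rfl, rfl⟩
      rw [ih, hstep.1, hstep.2]
      by_cases h1 : pos.contains r = false ∧ PySem.Str.len r ∈ ls ∧ r ∈ reads
          ∧ r.toList <+: c.toList.drop i.toNat
      · rw [if_pos h1, if_pos ⟨h1.1, List.mem_cons.mpr (Or.inr h1.2.1), h1.2.2⟩]
      · have h2 : ¬ (pos.contains r = false ∧ PySem.Str.len r ∈ L :: ls ∧ r ∈ reads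
            ∧ r.toList <+: c.toList.drop i.toNat) := by
          rintro ⟨hcf, hmem2, hmem3, hpre2⟩
          rcases List.mem_cons.mp hmem2 with hL | hL
          · exact hhit ⟨hL.symm, hmem3, hpre2, hcf⟩
          · exact h1 ⟨hcf, hL, hmem3, hpre2⟩
        rw [if_neg h1, if_neg h2]

-- effect of the position sweep on the entry of a read r
theorem findContigs_outerGet (reads : List String) (lengths : List Int) (c r : String)
    (is : List Int) (pos : PySem.Dict String Int)
    (his : ∀ i ∈ is, 0 ≤ i)
    (hrl : PySem.Str.len r ∈ lengths) (hr : r ∈ reads) :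
    (is.foldl (findContigsPosStep (PySem.Set.ofList reads) lengths c) pos).get? r
      = if pos.contains r then pos.get? r
        else is.find? (fun i => decide (r.toList <+: c.toList.drop i.toNat)) := by
  induction is generalizing pos with
  | nil =>
    simp only [List.foldl_nil, List.find?_nil]
    by_cases hc : pos.contains r
    · rw [if_pos hc]
    · rw [if_neg hc, (PySem.Dict.get?_eq_none_iff_contains pos r).mpr (by simpa using hc)]
  | cons i is ih =>
    have hi : 0 ≤ i := his i (List.mem_cons_self ..)
    rw [List.foldl_cons]
    have hstep : (findContigsPosStep (PySem.Set.ofList reads) lengths c pos i).get? r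
        = if pos.contains r = false ∧ PySem.Str.len r ∈ lengths ∧ r ∈ reads
              ∧ r.toList <+: c.toList.drop i.toNat
          then some i else pos.get? r := by
      unfold findContigsPosStep
      exact findContigs_innerGet reads lengths c r i hi pos
    set pos' := findContigsPosStep (PySem.Set.ofList reads) lengths c pos i with hp'
    rw [ih pos' (fun j hj => his j (List.mem_cons_of_mem _ hj))]
    by_cases hc : pos.contains r
    · have h1 : pos'.get? r = pos.get? r := by rw [hstep, if_neg (by simp [hc])]
      have h2 : pos'.contains r = true := by
        rw [PySem.Dict.contains_eq_isSome_get?, h1, ← PySem.Dict.contains_eq_isSome_get?, hc]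
      rw [h2, if_pos rfl, if_pos hc, h1]
    · have hcf : pos.contains r = false := by simpa using hc
      by_cases hpre : r.toList <+: c.toList.drop i.toNat
      · have h1 : pos'.get? r = some i := by rw [hstep, if_pos ⟨hcf, hrl, hr, hpre⟩]
        have h2 : pos'.contains r = true := by
          rw [PySem.Dict.contains_eq_isSome_get?, h1]; rfl
        rw [h2, if_pos rfl, h1, if_neg hc, List.find?_cons_of_pos (by simpa using hpre)]
      · have h1 : pos'.get? r = pos.get? r := by rw [hstep, if_neg (by tauto)]
        have h2 : pos'.contains r = false := by
          rw [PySem.Dict.contains_eq_isSome_get?, h1, ← PySem.Dict.contains_eq_isSome_get?, hcf]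
        rw [h2, if_neg (by simp), if_neg hc, List.find?_cons_of_neg (by simpa using hpre)]

-- first true value of p among 0,…,n-1
theorem findContigs_find?_range_first (p : Nat → Bool) (n m : Nat) (hm : m < n)
    (hp : p m = true) (hlt : ∀ k < m, p k = false) :
    (List.range n).find? p = some m := by
  induction n with
  | zero => omega
  | succ n ih =>
    rw [List.range_succ, List.find?_append]
    rcases Nat.lt_or_ge m n with h | h
    · rw [ih h]; rfl
    · have hmn : m = n := by omega
      have hnone : (List.range n).find? p = none := List.find?_eq_none.mpr (by
        intro x hx
        simp [hlt x (by have := List.mem_range.mp hx; omega)])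
      rw [hnone]
      subst hmn
      simp [hp]

-- first hit of the sweep over range(len(c)+1) is exactly str.find
theorem findContigs_firstHit (c r : String) :
    (PySem.List.pyRange 0 (PySem.Str.len c + 1) 1).find?
        (fun i => decide (r.toList <+: c.toList.drop i.toNat))
      = if PySem.Str.find c r = -1 then none else some (PySem.Str.find c r) := by
  rcases eq_or_ne (PySem.Str.find c r) (-1) with h | h
  · rw [if_pos h]
    have hninf : ¬ r.toList <:+: c.toList := by
      rw [PySem.Str.find_eq] at h
      exact (PySem.Chars.find_eq_neg_one_iff _ _).mp h
    apply List.find?_eq_none.mpr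
    intro i _
    simp only [decide_eq_true_eq]
    intro hpre
    exact hninf ((PySem.Chars.isIn_iff_infix _ _).mp
      ((PySem.Chars.exists_prefix_drop_iff_isIn _ _).mp ⟨i.toNat, hpre⟩))
  · rw [if_neg h]
    have h0 : 0 ≤ PySem.Str.find c r := by
      have := PySem.Chars.neg_one_le_find c.toList r.toList
      rw [PySem.Str.find_eq]
      rw [PySem.Str.find_eq] at h
      omega
    have hspec := PySem.Chars.find_spec (s := c.toList) (sub := r.toList)
      (by rw [← PySem.Str.find_eq]; exact h0)
    have hle : PySem.Str.find c r ≤ (c.toList.length : Int) := by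
      rw [PySem.Str.find_eq]; exact PySem.Chars.find_le_length _ _
    rw [PySem.List.pyRange_one, List.find?_map]
    rw [findContigs_find?_range_first _ _ (PySem.Str.find c r).toNat
      (by
        have hlen : (PySem.Str.len c + 1 - 0).toNat = c.toList.length + 1 := by
          rw [show PySem.Str.len c = ((c.toList.length : Nat) : Int) from rfl]; omega
        rw [hlen]; omega)
      (by
        simp only [Function.comp]
        have h2 : ((0 : Int) + ((PySem.Str.find c r).toNat : Int)).toNat
            = (PySem.Str.find c r).toNat := by omega
        rw [h2, PySem.Str.find_eq]
        simpa using hspec.1)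
      (by
        intro k hk
        simp only [Function.comp]
        have h2 : ((0 : Int) + (k : Int)).toNat = k := by omega
        rw [h2]
        simp only [decide_eq_false_iff_not]
        exact hspec.2 k hk)]
    simp only [Option.map_some]
    congr 1
    omega

theorem findContigs_posGet (reads : List String) (c r : String) (hr : r ∈ reads) :
    ((PySem.List.pyRange 0 (PySem.Str.len c + 1) 1).foldl
        (findContigsPosStep (PySem.Set.ofList reads)
          (PySem.List.sorted (PySem.Set.ofList (reads.map (fun r => PySem.Str.len r)))
            (fun x => x) false) c) PySem.Dict.empty).get? r
      = if PySem.Str.find c r = -1 then none else some (PySem.Str.find c r) := by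
  rw [findContigs_outerGet reads _ c r _ PySem.Dict.empty
    (fun i hi => ((PySem.List.mem_pyRange_one).mp hi).1)
    (by
      rw [PySem.List.mem_sorted, PySem.Set.mem_ofList]
      exact List.mem_map.mpr ⟨r, hr, rfl⟩)
    hr]
  have hemp : (PySem.Dict.empty : PySem.Dict String Int).contains r = false := rfl
  rw [hemp]
  simp only [Bool.false_eq_true, if_false]
  exact findContigs_firstHit c r

-- B's comprehension equals the closed-form list
theorem findContigs_matchesB_general (c : String) (pos : PySem.Dict String Int)
    (rs : List String)
    (hpos : ∀ r ∈ rs, pos.get? r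
      = if PySem.Str.find c r = -1 then none else some (PySem.Str.find c r))
    (acc : List (String × Int)) :
    rs.foldl (fun acc r =>
        match pos.get? r with
        | some i => acc ++ [(r, i)]
        | none => acc) acc
      = acc ++ findContigsList c rs := by
  induction rs generalizing acc with
  | nil => simp [findContigsList]
  | cons r rs ih =>
    rw [List.foldl_cons]
    have h := hpos r (List.mem_cons_self ..)
    rcases eq_or_ne (PySem.Str.find c r) (-1) with hf | hf
    · rw [if_pos hf] at h
      rw [h]
      simp only [findContigsList, List.filterMap_cons, hf]
      exact ih (fun x hx => hpos x (List.mem_cons_of_mem _ hx)) acc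
    · rw [if_neg hf] at h
      rw [h]
      simp only [findContigsList, List.filterMap_cons, if_neg hf]
      rw [ih (fun x hx => hpos x (List.mem_cons_of_mem _ hx))]
      simp [findContigsList]

theorem findContigs_matchesB (reads : List String) (c : String) :
    findContigsMatches reads
      ((PySem.List.pyRange 0 (PySem.Str.len c + 1) 1).foldl
        (findContigsPosStep (PySem.Set.ofList reads)
          (PySem.List.sorted (PySem.Set.ofList (reads.map (fun r => PySem.Str.len r)))
            (fun x => x) false) c) PySem.Dict.empty)
      = findContigsList c reads := by
  unfold findContigsMatches
  rw [findContigs_matchesB_general c _ reads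
    (fun r hr => findContigs_posGet reads c r hr) []]
  rfl

theorem findContigs_goEq (reads : List String) (cs : List String)
    (d : PySem.Dict String (List (String × Int))) (cnt : Int) :
    findContigsGoA reads cs d cnt
      = findContigsGoB reads (PySem.Set.ofList reads)
          (PySem.List.sorted (PySem.Set.ofList (reads.map (fun r => PySem.Str.len r)))
            (fun x => x) false) cs d cnt := by
  induction cs generalizing d cnt with
  | nil => rfl
  | cons c rest ih =>
    rw [findContigsGoA, findContigsGoB]
    by_cases h : cnt = (reads.length : Int)
    · rw [if_pos h, if_pos h]
    · rw [if_neg h, if_neg h]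
      have hA := findContigs_foldA c reads d [] cnt
      rw [List.nil_append] at hA
      simp only [hA, findContigs_matchesB]
      exact ih _ _

-- ===== VERDICT (by name: the statement is the Claim_ definition above) =====
theorem find_contigs_spec : Claim_equal_find_contigs := by
  intro contigs reads _
  unfold Spec_find_contigs find_contigs find_contigs_alt
  rw [findContigs_goEq]
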